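-- pv_equiv track=rewrite | github.com/KuaaMU/ai-factory | factory/evolution.py | _parse_cycle_log_content
-- ===== SOURCE A (Python) =====
-- def _parse_cycle_log_content(content: str) -> tuple[dict[str, str], str]:
--     """Parse cycle log content into fields dict and summary text."""
--     fields: dict[str, str] = {}
--     summary_lines: list[str] = []
--     past_separator = False
--
--     for line in content.strip().splitlines():
--         if line.strip() == "---":
--             past_separator = True
--             continue
--         if past_separator:
--             summary_lines.append(line)
--         elif ":" in line:
--             key, _, value = line.partition(":")
--             fields[key.strip()] = value.strip()
--
--     return fields, "\n".join(summary_lines)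
-- ===== SOURCE B (Python) =====
-- def _parse_cycle_log_content(content: str) -> tuple[dict[str, str], str]:
--     """Parse cycle log content into fields dict and summary text.
--
--     Declarative per-line classification: a line is a separator if it strips to
--     '---'; any other line is a summary line iff some separator occurs strictly
--     before it, and a header line otherwise. Fields and summary are built by two
--     independent comprehensions over the enumerated lines."""
--     lines = content.strip().splitlines()
--
--     def buried(i: int) -> bool:
--         return any(l.strip() == "---" for l in lines[:i])
--
--     fields = {
--         line.partition(":")[0].strip(): line.partition(":")[2].strip()
--         for i, line in enumerate(lines)
--         if line.strip() != "---" and not buried(i) and ":" in line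
--     }
--     summary = "\n".join(
--         line for i, line in enumerate(lines)
--         if line.strip() != "---" and buried(i)
--     )
--     return fields, summary
-- ===== Notes on version B (the rewrite author's own statement) =====
-- stated objective: alternative
-- what changed: Replaces A's single stateful loop (a past_separator flag mutated while scanning) by a stateless per-line classification: each line's role is decided independently by the positional predicate that a separator line occurs strictly before it, and fields and summary are built by two independent comprehensions over the enumerated lines.
import Mathlib
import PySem

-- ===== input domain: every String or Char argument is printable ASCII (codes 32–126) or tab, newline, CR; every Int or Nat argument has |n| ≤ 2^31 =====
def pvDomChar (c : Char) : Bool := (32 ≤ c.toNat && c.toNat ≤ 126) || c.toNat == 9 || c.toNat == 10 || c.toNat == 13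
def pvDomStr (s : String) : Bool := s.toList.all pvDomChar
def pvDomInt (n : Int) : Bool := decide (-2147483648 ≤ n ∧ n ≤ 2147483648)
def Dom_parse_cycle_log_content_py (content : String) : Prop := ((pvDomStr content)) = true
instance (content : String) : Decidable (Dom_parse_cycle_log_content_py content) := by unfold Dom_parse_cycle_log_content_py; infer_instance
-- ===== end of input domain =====

-- B replaces A's single stateful loop (past_separator flag) by a stateless per-line
-- classification: each line's role is decided by the positional predicate "a '---' line
-- occurs strictly before it", and fields/summary are built in two independent passes
-- (objective: alternative decomposition).

-- hand port of `key, _, value = line.partition(":")` (exact: span stops at the FIRST ':',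
-- value is everything after it, empty when ':' is absent — matching Python's partition)
def pvPartColon (s : String) : String × String :=
  let p := s.toList.span (· ≠ ':')
  (String.ofList p.1, String.ofList (p.2.drop 1))

-- ===== PORT A =====
-- loop body of A: state = (fields, summary_lines, past_separator)
def pvStepA (st : PySem.Dict String String × List String × Bool) (line : String) :
    PySem.Dict String String × List String × Bool :=
  if PySem.Str.strip line == "---" then (st.1, st.2.1, true)
  else if st.2.2 then (st.1, st.2.1 ++ [line], st.2.2)
  else if PySem.Str.isIn ":" line then
    (st.1.insert (PySem.Str.strip (pvPartColon line).1) (PySem.Str.strip (pvPartColon line).2),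
     st.2.1, st.2.2)
  else st

def parse_cycle_log_content_py (content : String) : (List (String × String)) × String :=
  let st := (PySem.Str.splitlines (PySem.Str.strip content)).foldl pvStepA
              (PySem.Dict.empty, [], false)
  (st.1.items, PySem.Str.join "\n" st.2.1)

-- ===== PORT B =====
-- buried(i): some line strictly before index i strips to "---" (port of Source B's `any` over lines[:i])
def pvBuried (lines : List String) (i : Int) : Bool :=
  (PySem.List.slice lines none (some i)).any (fun l => PySem.Str.strip l == "---")

-- the comprehension filters of Source B
def pvFieldCond (lines : List String) (p : Int × String) : Bool :=
  !(PySem.Str.strip p.2 == "---") && !(pvBuried lines p.1) && PySem.Str.isIn ":" p.2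

def pvSummaryCond (lines : List String) (p : Int × String) : Bool :=
  !(PySem.Str.strip p.2 == "---") && pvBuried lines p.1

def parse_cycle_log_content_py_alt (content : String) : (List (String × String)) × String :=
  let lines := PySem.Str.splitlines (PySem.Str.strip content)
  let fields := (PySem.List.enumerate lines).foldl
    (fun d p => if pvFieldCond lines p then
        d.insert (PySem.Str.strip (pvPartColon p.2).1) (PySem.Str.strip (pvPartColon p.2).2)
      else d) PySem.Dict.empty
  (fields.items,
   PySem.Str.join "\n" ((PySem.List.enumerate lines).filterMap
     (fun p => if pvSummaryCond lines p then some p.2 else none)))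

-- ===== PRECONDITION & SPEC =====
def Spec_parse_cycle_log_content_py (content : String) (out : (List (String × String)) × String) : Prop := out = parse_cycle_log_content_py_alt content
instance (content : String) (out : (List (String × String)) × String) : Decidable (Spec_parse_cycle_log_content_py content out) := by unfold Spec_parse_cycle_log_content_py; infer_instance

-- ===== CLAIM (what is proved, stated in full; the proofs are below) =====
def Claim_equal_parse_cycle_log_content_py : Prop := ∀ (content : String), Dom_parse_cycle_log_content_py content → Spec_parse_cycle_log_content_py content (parse_cycle_log_content_py content)

-- ===== LEMMAS AND PROOFS =====

-- the generic fields step A performs before the separator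
def pvFieldStep (d : PySem.Dict String String) (line : String) : PySem.Dict String String :=
  if PySem.Str.isIn ":" line then
    d.insert (PySem.Str.strip (pvPartColon line).1) (PySem.Str.strip (pvPartColon line).2)
  else d

-- once past the separator, A's loop just appends every non-'---' line to the summary
theorem pvFoldA_past (ls : List String) (d : PySem.Dict String String) (acc : List String) :
    ls.foldl pvStepA (d, acc, true)
      = (d, acc ++ ls.filter (fun l => !(PySem.Str.strip l == "---")), true) := by
  induction ls generalizing acc with
  | nil => simp
  | cons l ls ih =>
    by_cases h : PySem.Str.strip l == "---"
    · simp [pvStepA, h, ih]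
    · simp [pvStepA, h, ih]

-- A's whole loop, started before the separator, split at the first '---' line
theorem pvFoldA_pre (ls : List String) (d : PySem.Dict String String) (acc : List String) :
    ls.foldl pvStepA (d, acc, false)
      = match ls.findIdx? (fun l => PySem.Str.strip l == "---") with
        | none => (ls.foldl pvFieldStep d, acc, false)
        | some i =>
            ((ls.take i).foldl pvFieldStep d,
             acc ++ ((ls.drop (i + 1)).filter (fun l => !(PySem.Str.strip l == "---"))), true) := by
  induction ls generalizing d with
  | nil => simp
  | cons l ls ih =>
    by_cases h : PySem.Str.strip l == "---"
    · simp [pvStepA, h, List.findIdx?_cons, pvFoldA_past]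
    · have hstep : pvStepA (d, acc, false) l = (pvFieldStep d l, acc, false) := by
        simp [pvStepA, pvFieldStep, h]
        split <;> rfl
      rw [List.foldl_cons, hstep, ih]
      simp only [List.findIdx?_cons, h]
      cases hfi : ls.findIdx? (fun l => PySem.Str.strip l == "---") with
      | none => simp
      | some i => simp [List.take_succ_cons, List.drop_succ_cons]

-- B's fields fold reduces to the plain pvFieldStep fold when the filter is the colon test
theorem pvFoldField_congr (zs : List (Int × String)) (c : Int × String → Bool)
    (d : PySem.Dict String String)
    (h : ∀ p ∈ zs, c p = PySem.Str.isIn ":" p.2) :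
    zs.foldl (fun d p => if c p then
        d.insert (PySem.Str.strip (pvPartColon p.2).1) (PySem.Str.strip (pvPartColon p.2).2)
      else d) d
      = (zs.map (·.2)).foldl pvFieldStep d := by
  induction zs generalizing d with
  | nil => rfl
  | cons p zs ih =>
    have hp := h p (by simp)
    simp only [List.foldl_cons, List.map_cons, hp]
    rw [ih _ (fun q hq => h q (by simp [hq]))]
    rfl

-- a fold whose filter is everywhere false does nothing
theorem pvFoldField_skip (zs : List (Int × String)) (c : Int × String → Bool)
    (d : PySem.Dict String String) (h : ∀ p ∈ zs, c p = false) :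
    zs.foldl (fun d p => if c p then
        d.insert (PySem.Str.strip (pvPartColon p.2).1) (PySem.Str.strip (pvPartColon p.2).2)
      else d) d = d := by
  induction zs generalizing d with
  | nil => rfl
  | cons p zs ih =>
    have hp := h p (by simp)
    simp only [List.foldl_cons, hp, if_neg Bool.false_ne_true]
    exact ih d (fun q hq => h q (by simp [hq]))

-- B's summary filterMap reduces to a plain filter when the index part of the filter is settled
theorem pvFilterMap_congr (zs : List (Int × String)) (c : Int × String → Bool)
    (g : String → Bool) (h : ∀ p ∈ zs, c p = g p.2) :
    zs.filterMap (fun p => if c p then some p.2 else none)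
      = (zs.map (·.2)).filter g := by
  induction zs with
  | nil => rfl
  | cons p zs ih =>
    have hp := h p (by simp)
    simp only [List.filterMap_cons, List.map_cons, List.filter_cons, hp]
    rw [ih (fun q hq => h q (by simp [hq]))]
    by_cases hg : g p.2 <;> simp [hg]

theorem pvFilterMap_skip (zs : List (Int × String)) (c : Int × String → Bool)
    (h : ∀ p ∈ zs, c p = false) :
    zs.filterMap (fun p => if c p then some p.2 else none) = [] := by
  induction zs with
  | nil => rfl
  | cons p zs ih =>
    have hp := h p (by simp)
    simp only [List.filterMap_cons, hp, if_neg Bool.false_ne_true]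
    exact ih (fun q hq => h q (by simp [hq]))

-- pvBuried at a Nat index is an `any` over the prefix
theorem pvBuried_natCast (lines : List String) (j : Nat) :
    pvBuried lines (j : Int) = (lines.take j).any (fun l => PySem.Str.strip l == "---") := by
  rw [pvBuried, PySem.List.slice_to_natCast]

-- when no line is a separator, pvBuried is everywhere false
theorem pvBuried_of_none (lines : List String)
    (h : lines.findIdx? (fun l => PySem.Str.strip l == "---") = none) (i : Int) :
    pvBuried lines i = false := by
  rw [pvBuried]
  rw [List.findIdx?_eq_none_iff] at h
  exact List.any_eq_false.mpr (fun x hx => by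
    simpa using h x (PySem.List.mem_of_mem_slice _ _ _ hx))

-- when the first separator is at index k, pvBuried ↑j = decide (k < j)
theorem pvBuried_of_some (lines : List String) (k : Nat)
    (h : lines.findIdx? (fun l => PySem.Str.strip l == "---") = some k) (j : Nat) :
    pvBuried lines (j : Int) = decide (k < j) := by
  obtain ⟨hk, hsep, hlow⟩ := List.findIdx?_eq_some_iff_getElem.mp h
  rw [pvBuried_natCast]
  by_cases hkj : k < j
  · simp only [decide_eq_true hkj]
    exact List.any_eq_true.mpr ⟨lines[k], by
      exact List.mem_take_iff_getElem.mpr ⟨k, by omega, by simp⟩, hsep⟩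
  · simp only [decide_eq_false hkj]
    refine List.any_eq_false.mpr (fun x hx => ?_)
    obtain ⟨m, hm, rfl⟩ := List.mem_take_iff_getElem.mp hx
    have : m < k := by omega
    simpa using hlow m this

-- ===== VERDICT (by name: the statement is the Claim_ definition above) =====
set_option maxHeartbeats 1000000 in
theorem parse_cycle_log_content_py_spec : Claim_equal_parse_cycle_log_content_py := by
  intro content _
  unfold Spec_parse_cycle_log_content_py parse_cycle_log_content_py parse_cycle_log_content_py_alt
  set lines := PySem.Str.splitlines (PySem.Str.strip content) with hlines
  rw [pvFoldA_pre]
  cases hfi : lines.findIdx? (fun l => PySem.Str.strip l == "---") with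
  | none =>
    dsimp only
    have hnosep : ∀ l ∈ lines, (PySem.Str.strip l == "---") = false := by
      intro l hl; simpa using List.findIdx?_eq_none_iff.mp hfi l hl
    have hfld : ∀ p ∈ PySem.List.enumerate lines 0,
        pvFieldCond lines p = PySem.Str.isIn ":" p.2 := by
      intro p hp
      obtain ⟨m, hm, rfl⟩ := (PySem.List.mem_enumerate_iff _ _ _).mp hp
      simp [pvFieldCond, hnosep _ (List.getElem_mem hm), pvBuried_of_none lines hfi]
    have hsum : ∀ p ∈ PySem.List.enumerate lines 0,
        pvSummaryCond lines p = false := by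
      intro p hp
      simp [pvSummaryCond, pvBuried_of_none lines hfi]
    rw [pvFoldField_congr _ _ _ hfld, pvFilterMap_skip _ _ hsum,
        PySem.List.map_snd_enumerate]
  | some k =>
    dsimp only
    obtain ⟨hk, hsep, hlow⟩ := List.findIdx?_eq_some_iff_getElem.mp hfi
    have hburied : ∀ j : Nat, pvBuried lines (j : Int) = decide (k < j) :=
      pvBuried_of_some lines k hfi
    have hbhigh : ∀ m : Nat, pvBuried lines ((k : Int) + 1 + (m : Int)) = true := by
      intro m
      have hcast : (k : Int) + 1 + (m : Int) = ((k + 1 + m : Nat) : Int) := by push_cast; ring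
      rw [hcast, hburied (k + 1 + m)]
      exact decide_eq_true (by omega)
    have hdecomp : lines = lines.take k ++ lines[k] :: lines.drop (k + 1) := by
      conv_lhs => rw [← List.take_append_drop k lines, List.drop_eq_getElem_cons hk]
    have henum : PySem.List.enumerate lines 0
        = PySem.List.enumerate (lines.take k) 0
          ++ ((k : Int), lines[k]) :: PySem.List.enumerate (lines.drop (k + 1)) ((k : Int) + 1) := by
      conv_lhs => rw [hdecomp]
      rw [PySem.List.enumerate_append, PySem.List.enumerate_cons]
      have : (lines.take k).length = k := List.length_take_of_le (by omega)
      simp [this]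
    -- the three segments of the fields fold and the summary filterMap
    have hfld1 : ∀ p ∈ PySem.List.enumerate (lines.take k) 0,
        pvFieldCond lines p = PySem.Str.isIn ":" p.2 := by
      intro p hp
      obtain ⟨m, hm, rfl⟩ := (PySem.List.mem_enumerate_iff _ _ _).mp hp
      have hmk : m < k := by
        have := hm; simp [List.length_take] at this; omega
      have hml : m < lines.length := by omega
      have hnosep : (PySem.Str.strip (lines[m]'hml) == "---") = false := by
        simpa using hlow m hmk
      simp [pvFieldCond, hburied m, Nat.not_lt.mpr (le_of_lt hmk), List.getElem_take, hnosep]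
    have hfld3 : ∀ p ∈ PySem.List.enumerate (lines.drop (k + 1)) ((k : Int) + 1),
        pvFieldCond lines p = false := by
      intro p hp
      obtain ⟨m, hm, rfl⟩ := (PySem.List.mem_enumerate_iff _ _ _).mp hp
      simp [pvFieldCond, hbhigh m]
    have hsum1 : ∀ p ∈ PySem.List.enumerate (lines.take k) 0,
        pvSummaryCond lines p = false := by
      intro p hp
      obtain ⟨m, hm, rfl⟩ := (PySem.List.mem_enumerate_iff _ _ _).mp hp
      have hmk : m < k := by
        have := hm; simp [List.length_take] at this; omega
      simp [pvSummaryCond, hburied m, Nat.not_lt.mpr (le_of_lt hmk)]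
    have hsum3 : ∀ p ∈ PySem.List.enumerate (lines.drop (k + 1)) ((k : Int) + 1),
        pvSummaryCond lines p = (fun l => !(PySem.Str.strip l == "---")) p.2 := by
      intro p hp
      obtain ⟨m, hm, rfl⟩ := (PySem.List.mem_enumerate_iff _ _ _).mp hp
      simp [pvSummaryCond, hbhigh m]
    have hmidf : pvFieldCond lines ((k : Int), lines[k]) = false := by
      simp [pvFieldCond, hsep]
    have hmids : pvSummaryCond lines ((k : Int), lines[k]) = false := by
      simp [pvSummaryCond, hsep]
    simp only [henum]
    rw [List.foldl_append, List.filterMap_append]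
    rw [pvFoldField_congr _ _ _ hfld1, pvFilterMap_skip _ _ hsum1]
    simp only [List.foldl_cons, List.filterMap_cons, hmidf, hmids,
      if_neg Bool.false_ne_true]
    rw [pvFoldField_skip _ _ _ hfld3,
        pvFilterMap_congr _ _ (fun l => !(PySem.Str.strip l == "---")) hsum3,
        PySem.List.map_snd_enumerate, PySem.List.map_snd_enumerate]
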